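-- pv_equiv track=rewrite | github.com/wym1993/Leetcode | 288. Unique Word Abbreviation.py | formDict
-- ===== SOURCE A (Python) =====
-- def formDict(dictionary):
--     dic = {};
--     for word in dictionary:
--         if len(word)<3:
--             abb = word;
--         else:
--             abb = word[0]+str(len(word)-2)+word[-1];
--
--         if not abb in dic:
--             dic[abb] = [word];
--         else:
--             dic[abb].append(word);
--
--     return dic;
-- ===== SOURCE B (Python) =====
-- def formDict(dictionary):
--     def abb(w):
--         return w if len(w) < 3 else w[:1] + str(len(w) - 2) + w[-1:]
--
--     pairs = [(abb(w), w) for w in dictionary]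
--     out = {}
--     while pairs:
--         # split off the whole group of the first remaining abbreviation
--         a = pairs[0][0]
--         out[a] = [w for x, w in pairs if x == a]
--         pairs = [(x, w) for x, w in pairs if x != a]
--     return out
-- ===== Notes on version B (the rewrite author's own statement) =====
-- stated objective: alternative
-- what changed: Replaces A's single-pass dict bucketing (insert-or-append per word) with a partition loop: tag each word with its abbreviation, repeatedly split off the whole group of the first remaining abbreviation, and continue on the leftover pairs.
import Mathlib
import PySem

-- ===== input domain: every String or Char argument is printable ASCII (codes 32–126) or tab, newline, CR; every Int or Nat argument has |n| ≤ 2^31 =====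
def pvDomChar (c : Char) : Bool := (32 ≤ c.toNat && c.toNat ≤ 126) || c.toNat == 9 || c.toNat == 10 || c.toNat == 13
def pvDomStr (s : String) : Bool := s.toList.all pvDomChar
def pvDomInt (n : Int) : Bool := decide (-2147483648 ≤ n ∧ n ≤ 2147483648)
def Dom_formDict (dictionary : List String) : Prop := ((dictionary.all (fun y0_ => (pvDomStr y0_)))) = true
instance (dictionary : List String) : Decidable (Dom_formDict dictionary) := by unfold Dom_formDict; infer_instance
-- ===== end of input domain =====

-- B replaces A's single-pass insert-or-append dict bucketing with a partition loop:
-- tag each word with its abbreviation, then repeatedly split off the whole group of the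
-- first remaining abbreviation and continue on the leftovers (alternative decomposition, same value).

-- ===== PORT A =====
-- abbreviation rule of A: word if len < 3 else word[0] + str(len-2) + word[-1]
-- (the two indexings are in range because this branch has len ≥ 3)
def abbA (word : String) : String :=
  if PySem.Str.len word < 3 then word
  else String.ofList ([(PySem.List.pyGet? word.toList 0).getD ' ']
        ++ (PySem.Int.toStr ((PySem.Str.len word : Int) - 2)).toList
        ++ [(PySem.List.pyGet? word.toList (-1)).getD ' '])

def formDict (dictionary : List String) : List (String × List String) :=
  let dic := dictionary.foldl (fun dic word =>
    let abb := abbA word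
    if dic.contains abb = false then dic.insert abb [word]
    else dic.modify abb [] (fun l => l ++ [word])) PySem.Dict.empty
  dic.items

-- ===== PORT B =====
-- B's abbreviation rule: word if len < 3 else word[:1] + str(len-2) + word[-1:]
def abbB (word : String) : String :=
  if PySem.Str.len word < 3 then word
  else String.ofList (PySem.List.slice word.toList none (some 1)
        ++ (PySem.Int.toStr ((PySem.Str.len word : Int) - 2)).toList
        ++ PySem.List.slice word.toList (some (-1)) none)

-- B's 'while pairs' partition loop, ported as recursion on the shrinking pairs list:
-- each step emits the head abbreviation's whole group and keeps the other pairs.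
def goB : List (String × String) → List (String × List String)
  | [] => []
  | (a, w) :: rest =>
      (a, (((a, w) :: rest).filter (fun p => p.1 == a)).map Prod.snd)
        :: goB (rest.filter (fun p => p.1 != a))
termination_by ps => ps.length
decreasing_by
  simp only [List.length_cons, List.length_unattach]
  exact Nat.lt_succ_of_le (le_trans (List.length_filter_le _ _) (le_of_eq List.length_attach))

def formDict_alt (dictionary : List String) : List (String × List String) :=
  goB (dictionary.map (fun w => (abbB w, w)))

-- ===== PRECONDITION & SPEC =====
def Spec_formDict (dictionary : List String) (out : List (String × List String)) : Prop := out = formDict_alt dictionary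
instance (dictionary : List String) (out : List (String × List String)) : Decidable (Spec_formDict dictionary out) := by unfold Spec_formDict; infer_instance

-- ===== CLAIM (what is proved, stated in full; the proofs are below) =====
def Claim_equal_formDict : Prop := ∀ (dictionary : List String), Dom_formDict dictionary → Spec_formDict dictionary (formDict dictionary)

-- ===== LEMMAS AND PROOFS =====

-- w[:1] is [w[0]] on a nonempty string
theorem slice_take_one (cs : List Char) (h : cs ≠ []) :
    PySem.List.slice cs none (some 1) = [(PySem.List.pyGet? cs 0).getD ' '] := by
  rw [show (1 : Int) = ((1 : Nat) : Int) from rfl, PySem.List.slice_to_natCast]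
  match cs with
  | c :: t => simp [pysem, PySem.List.pyGet?, PySem.List.pyIdx?]

-- w[-1:] is [w[-1]] on a nonempty string
theorem slice_last_one (cs : List Char) (h : cs ≠ []) :
    PySem.List.slice cs (some (-1)) none = [(PySem.List.pyGet? cs (-1)).getD ' '] := by
  rw [PySem.List.slice_from_neg_one]
  induction cs with
  | nil => exact absurd rfl h
  | cons c t ih =>
    match t, ih with
    | [], _ => simp [pysem, PySem.List.pyGet?, PySem.List.pyIdx?]
    | d :: u, ih =>
      have h2 : (d :: u : List Char) ≠ [] := by simp
      have e1 : (c :: d :: u : List Char).drop ((c :: d :: u).length - 1)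
          = (d :: u).drop ((d :: u).length - 1) := by
        simp [List.drop_succ_cons]
      have e2 : PySem.List.pyGet? (c :: d :: u) (-1) = PySem.List.pyGet? (d :: u) (-1) := by
        simp only [pysem, PySem.List.pyGet?, PySem.List.pyIdx?]
        norm_num
        rfl
      rw [e1, e2, ih h2]

-- the two abbreviation rules agree
theorem abb_eq (w : String) : abbB w = abbA w := by
  unfold abbA abbB
  by_cases h : PySem.Str.len w < 3
  · rw [if_pos h, if_pos h]
  · have hne : w.toList ≠ [] := by
      have hl : 3 ≤ w.toList.length := by
        rw [PySem.Str.len_eq] at h; omega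
      intro e; rw [e] at hl; simp at hl
    rw [if_neg h, if_neg h, slice_take_one _ hne, slice_last_one _ hne]

theorem add_eq_of_mem (s : PySem.Set String) (x : String) (hx : x ∈ s) :
    PySem.Set.add s x = s := by
  simp [PySem.Set.add, hx]

theorem foldl_add_filter (l : List String) (a : String) :
    ∀ s : PySem.Set String, a ∈ s →
      l.foldl PySem.Set.add s = (l.filter (fun x => x != a)).foldl PySem.Set.add s := by
  induction l with
  | nil => intro s _; rfl
  | cons x t ih =>
    intro s hs
    by_cases hxa : x = a
    · subst hxa
      simp only [List.filter_cons, bne_self_eq_false, List.foldl_cons,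
        add_eq_of_mem s x hs]
      exact ih s hs
    · have hb : (x != a) = true := by simp [hxa]
      simp only [List.filter_cons, hb, List.foldl_cons]
      exact ih (PySem.Set.add s x) ((PySem.Set.mem_add s x a).mpr (Or.inl hs))

theorem foldl_add_cons (a : String) :
    ∀ l : List String, a ∉ l →
      ∀ s : List String, l.foldl PySem.Set.add (a :: s) = a :: l.foldl PySem.Set.add s := by
  intro l
  induction l with
  | nil => intro _ s; rfl
  | cons x t ih =>
    intro h s
    have hxa2 : x ≠ a := by
      intro e; subst e; exact h List.mem_cons_self
    have hstep : PySem.Set.add (a :: s) x = a :: PySem.Set.add s x := by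
      by_cases hc : x ∈ s
      · simp [PySem.Set.add, hc, hxa2]
      · simp [PySem.Set.add, hc, hxa2]
    rw [List.foldl_cons, hstep, List.foldl_cons]
    exact ih (fun ha => h (List.mem_cons_of_mem _ ha)) (PySem.Set.add s x)

-- first-occurrence dedup peels its head and discards that value from the tail
theorem dedup_cons (a : String) (l : List String) :
    PySem.List.dedup (a :: l) = a :: PySem.List.dedup (l.filter (fun x => x != a)) := by
  rw [PySem.List.dedup_eq_ofList, PySem.List.dedup_eq_ofList,
    PySem.Set.ofList_eq_foldl, PySem.Set.ofList_eq_foldl]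
  rw [List.foldl_cons]
  have h0 : PySem.Set.add ([] : List String) a = [a] := rfl
  rw [h0, foldl_add_filter l a [a] (List.mem_singleton.mpr rfl)]
  exact foldl_add_cons a (l.filter (fun x => x != a))
    (by simp) []

-- characterisation of B's recursive partition
theorem goB_eq_fuel : ∀ (n : Nat) (ps : List (String × String)), ps.length ≤ n →
    goB ps = (PySem.List.dedup (ps.map Prod.fst)).map
      (fun a => (a, (ps.filter (fun p => p.1 == a)).map Prod.snd)) := by
  intro n
  induction n with
  | zero =>
    intro ps h
    have : ps = [] := List.eq_nil_of_length_eq_zero (Nat.le_zero.mp h)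
    subst this
    simp [goB]
  | succ n ih =>
    intro ps h
    match ps with
    | [] => simp [goB]
    | (a, w) :: rest =>
      have hlen : (rest.filter (fun p => p.1 != a)).length ≤ n := by
        have := List.length_filter_le (fun p : String × String => p.1 != a) rest
        simp only [List.length_cons] at h
        omega
      rw [goB, List.map_cons, dedup_cons]
      have hmf : (rest.map Prod.fst).filter (fun x => x != a)
          = (rest.filter (fun p => p.1 != a)).map Prod.fst := List.filter_map ..
      rw [hmf, ih _ hlen, List.map_cons]
      congr 1
      apply List.map_congr_left
      intro b hb
      have hbmem : b ∈ (rest.filter (fun p => p.1 != a)).map Prod.fst := by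
        rw [← PySem.List.mem_dedup]; exact hb
      have hbne : b ≠ a := by
        obtain ⟨p, hp, hpb⟩ := List.mem_map.mp hbmem
        have := (List.mem_filter.mp hp).2
        simp only [bne_iff_ne] at this
        exact hpb ▸ this
      have hfe : ((a, w) :: rest).filter (fun p => p.1 == b)
          = (rest.filter (fun p => p.1 != a)).filter (fun p => p.1 == b) := by
        have hhead : ((a, w) :: rest).filter (fun p => p.1 == b) = rest.filter (fun p => p.1 == b) := by
          rw [List.filter_cons]
          have : ((a, w).1 == b) = false := by simp [Ne.symm hbne]
          rw [this]; simp
        rw [hhead, List.filter_filter]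
        apply List.filter_congr
        intro x _
        by_cases hxb : x.1 = b
        · simp [hxb, hbne]
        · simp [hxb]
      rw [hfe]

theorem goB_eq (ps : List (String × String)) :
    goB ps = (PySem.List.dedup (ps.map Prod.fst)).map
      (fun a => (a, (ps.filter (fun p => p.1 == a)).map Prod.snd)) :=
  goB_eq_fuel ps.length ps le_rfl

-- A's insert-or-append branch is, per step, exactly 'dic[abb] = dic.get(abb, []) + [word]'
theorem branch_eq_modify (d : PySem.Dict String (List String)) (k w : String) :
    (if d.contains k = false then d.insert k [w] else d.modify k [] (fun l => l ++ [w]))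
      = d.modify k [] (fun l => l ++ [w]) := by
  by_cases h : d.contains k = false
  · simp [h, PySem.Dict.modify, PySem.Dict.getD_of_not_contains d [] h]
  · simp [h]

-- A's loop is a fold of modify steps over the (abbreviation, word) pairs
theorem formDict_eq_modify_fold (dictionary : List String) :
    formDict dictionary =
      ((dictionary.map (fun w => (abbA w, w))).foldl
        (fun d p => d.modify p.1 [] (fun l => l ++ [p.2])) PySem.Dict.empty).items := by
  unfold formDict
  rw [List.foldl_map]
  exact congrArg PySem.Dict.items (PySem.List.foldl_congr_mem (l := dictionary)
    (f := fun dic word => if dic.contains (abbA word) = false then dic.insert (abbA word) [word]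
          else dic.modify (abbA word) [] (fun l => l ++ [word]))
    (g := fun d w => d.modify (abbA w) [] (fun l => l ++ [w]))
    (init := PySem.Dict.empty)
    (fun acc x _ => branch_eq_modify acc (abbA x) x))

-- characterisation of A's dict fold
theorem formDict_eq (dictionary : List String) :
    formDict dictionary =
      (PySem.List.dedup ((dictionary.map (fun w => (abbA w, w))).map Prod.fst)).map
        (fun a => (a, ((dictionary.map (fun w => (abbA w, w))).filter (fun p => p.1 == a)).map Prod.snd)) := by
  rw [formDict_eq_modify_fold]
  have hnd : ((dictionary.map (fun w => (abbA w, w))).foldl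
      (fun d p => d.modify p.1 [] (fun l => l ++ [p.2])) PySem.Dict.empty).keys.Nodup := by
    exact PySem.Dict.nodup_keys_foldl_modify_key (dictionary.map (fun w => (abbA w, w)))
      (fun p : String × String => p.1) []
      (fun d (p : String × String) l => l ++ [p.2]) PySem.Dict.empty (by simp)
  rw [PySem.Dict.items_eq_map_keys _ hnd []]
  have hkeys : ((dictionary.map (fun w => (abbA w, w))).foldl
      (fun d p => d.modify p.1 [] (fun l => l ++ [p.2])) PySem.Dict.empty).keys
      = PySem.List.dedup ((dictionary.map (fun w => (abbA w, w))).map Prod.fst) := by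
    rw [PySem.Dict.keys_foldl_modify_key]
    rfl
  rw [hkeys]
  apply List.map_congr_left
  intro a _
  congr 1
  rw [PySem.Dict.getD_foldl_modify_append]
  simp [PySem.Dict.getD]

-- ===== VERDICT (by name: the statement is the Claim_ definition above) =====
theorem formDict_spec : Claim_equal_formDict := by
  intro dictionary _
  unfold Spec_formDict formDict_alt
  rw [formDict_eq, goB_eq]
  simp only [abb_eq]
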